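-- pv_equiv track=rewrite | github.com/MarquesThiago/sumarize-text | luhn.py | define_group
-- ===== SOURCE A (Python) =====
-- def define_group(index, distance):
--
--     '''
--     create subgroups in the matrix of indexes, considering the
--     distance between index.
--     :param index : list -> matrix of the index
--     :param distance: int -> parameter distance between index
--     :return list listed:
--     '''
--
--     listed = []
--
--     for group in index:
--         if len(group) == 0:
--             listed.append([])
--             continue
--
--         list_group = []
--         sub_group = [group[0]]
--         num = 1
--
--         while num < len(group):
--             if group[num] - group[num-1] < distance:
--                 sub_group.append(group[num])
--
--             else:
--                 list_group.append(sub_group[:])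
--                 sub_group = [group[num]]
--             num += 1
--
--         list_group.append(sub_group)
--         listed.append(list_group)
--
--     return listed
-- ===== SOURCE B (Python) =====
-- def define_group(index, distance):
--     def split(group):
--         out = []
--         for x in reversed(group):
--             if out and out[0][0] - x < distance:
--                 out[0] = [x] + out[0]
--             else:
--                 out = [[x]] + out
--         return out
--     return [split(group) for group in index]
-- ===== Notes on version B (the rewrite author's own statement) =====
-- stated objective: alternative
-- what changed: Replaces the forward while-loop with flush-on-gap accumulator state (list_group/sub_group/num) by a single backward pass that builds the subgroup list back-to-front, prepending each element to the first subgroup or opening a new one.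
import Mathlib
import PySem

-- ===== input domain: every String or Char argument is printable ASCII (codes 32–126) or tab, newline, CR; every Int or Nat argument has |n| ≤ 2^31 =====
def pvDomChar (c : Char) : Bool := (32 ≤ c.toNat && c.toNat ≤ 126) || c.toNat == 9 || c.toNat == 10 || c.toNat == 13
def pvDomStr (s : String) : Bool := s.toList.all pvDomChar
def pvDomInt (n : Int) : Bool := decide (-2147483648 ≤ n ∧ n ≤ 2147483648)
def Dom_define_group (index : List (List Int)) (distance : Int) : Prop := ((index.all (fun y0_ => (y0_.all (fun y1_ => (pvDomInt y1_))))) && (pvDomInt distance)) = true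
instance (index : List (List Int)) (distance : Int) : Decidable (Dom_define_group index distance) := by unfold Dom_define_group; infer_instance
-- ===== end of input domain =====

-- B builds each subgroup list back-to-front in one reverse pass (foldr), replacing A's
-- forward while-loop with list_group/sub_group accumulator state; alternative decomposition, same cost.


-- ===== PORT A =====
-- while num < len(group): state (list_group, sub_group); group[num] is the next
-- element x, group[num-1] is the previously seen element prev.
def aLoop (distance : Int) (list_group : List (List Int)) (sub_group : List Int)
    (prev : Int) : List Int → List (List Int) × List Int
  | [] => (list_group, sub_group)
  | x :: rest =>
      if x - prev < distance then
        aLoop distance list_group (sub_group ++ [x]) x rest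
      else
        aLoop distance (list_group ++ [sub_group]) [x] x rest

def define_group (index : List (List Int)) (distance : Int) : List (List (List Int)) :=
  index.foldl (fun listed group =>
    match group with
    | [] => listed ++ [[]]
    | h :: t =>
        let r := aLoop distance [] [h] h t
        listed ++ [r.1 ++ [r.2]]) []

-- ===== PORT B =====
-- 'if out and out[0][0] - x < distance: out[0] = [x] + out[0] else: out = [[x]] + out';
-- the '[] :: cs' match arm is unreachable in Python (subgroups are never empty).
def bStep (distance : Int) (x : Int) (out : List (List Int)) : List (List Int) :=
  match out with
  | (y :: c) :: cs => if y - x < distance then (x :: y :: c) :: cs else [x] :: (y :: c) :: cs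
  | _ => [[x]]

def define_group_alt (index : List (List Int)) (distance : Int) : List (List (List Int)) :=
  index.map (fun group => group.foldr (bStep distance) [])

-- ===== PRECONDITION & SPEC =====
def Spec_define_group (index : List (List Int)) (distance : Int) (out : List (List (List Int))) : Prop := out = define_group_alt index distance
instance (index : List (List Int)) (distance : Int) (out : List (List (List Int))) : Decidable (Spec_define_group index distance out) := by unfold Spec_define_group; infer_instance

-- ===== CLAIM (what is proved, stated in full; the proofs are below) =====
def Claim_equal_define_group : Prop := ∀ (index : List (List Int)) (distance : Int), Dom_define_group index distance → Spec_define_group index distance (define_group index distance)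

-- ===== LEMMAS AND PROOFS =====

-- B's backward build always produces a first subgroup headed by the first element.
theorem bFoldr_head (d x : Int) (rest : List Int) :
    ∃ c cs, (x :: rest).foldr (bStep d) [] = (x :: c) :: cs := by
  cases rest with
  | nil => exact ⟨[], [], rfl⟩
  | cons y t =>
      obtain ⟨c, cs, h'⟩ := bFoldr_head d y t
      rw [show (x :: y :: t).foldr (bStep d) [] = bStep d x ((y :: t).foldr (bStep d) []) from rfl, h']
      unfold bStep
      by_cases hlt : y - x < d
      · exact ⟨y :: c, cs, by simp [hlt]⟩
      · exact ⟨[], (y :: c) :: cs, by simp [hlt]⟩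

theorem aLoop_eq (d : Int) (rest : List Int) : ∀ (prev : Int) (lg : List (List Int))
    (sg c : List Int) (cs : List (List Int)),
    (prev :: rest).foldr (bStep d) [] = (prev :: c) :: cs →
    (aLoop d lg sg prev rest).1 ++ [(aLoop d lg sg prev rest).2] = lg ++ (sg ++ c) :: cs := by
  induction rest with
  | nil =>
      intro prev lg sg c cs h
      simp only [List.foldr, bStep] at h
      obtain ⟨hc, hcs⟩ : c = [] ∧ cs = [] := by
        constructor <;> (cases h'' : c <;> cases h''' : cs <;> simp_all)
      simp [aLoop, hc, hcs]
  | cons x rest ih =>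
      intro prev lg sg c cs h
      obtain ⟨c', cs', hx⟩ := bFoldr_head d x rest
      rw [show (prev :: x :: rest).foldr (bStep d) [] = bStep d prev ((x :: rest).foldr (bStep d) []) from rfl, hx] at h
      unfold bStep at h
      by_cases hlt : x - prev < d
      · simp only [hlt, if_pos] at h
        obtain ⟨hc, hcs⟩ : c = x :: c' ∧ cs = cs' := by
          constructor <;> simp_all
        rw [show aLoop d lg sg prev (x :: rest) = aLoop d lg (sg ++ [x]) x rest from by simp [aLoop, hlt]]
        rw [ih x lg (sg ++ [x]) c' cs' hx, hc, hcs]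
        simp
      · simp only [hlt, if_neg, not_false_iff] at h
        obtain ⟨hc, hcs⟩ : c = [] ∧ cs = (x :: c') :: cs' := by
          constructor <;> simp_all
        rw [show aLoop d lg sg prev (x :: rest) = aLoop d (lg ++ [sg]) [x] x rest from by simp [aLoop, hlt]]
        rw [ih x (lg ++ [sg]) [x] c' cs' hx, hc, hcs]
        simp

theorem foldl_append_map (f : List Int → List (List Int)) (l : List (List Int)) :
    ∀ acc, l.foldl (fun listed g => listed ++ [f g]) acc = acc ++ l.map f := by
  induction l with
  | nil => intro acc; simp
  | cons g t ih => intro acc; simp [List.foldl, ih]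

theorem group_eq (d : Int) (g : List Int) :
    (match g with
      | [] => [] 
      | h :: t => (aLoop d [] [h] h t).1 ++ [(aLoop d [] [h] h t).2]) = g.foldr (bStep d) [] := by
  cases g with
  | nil => rfl
  | cons h t =>
      obtain ⟨c, cs, hx⟩ := bFoldr_head d h t
      simpa [hx] using aLoop_eq d t h [] [h] c cs hx

-- ===== VERDICT (by name: the statement is the Claim_ definition above) =====
theorem define_group_spec : Claim_equal_define_group := by
  intro index distance _
  unfold Spec_define_group define_group define_group_alt
  rw [show (fun (listed : List (List (List Int))) (group : List Int) =>
        match group with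
        | [] => listed ++ [[]]
        | h :: t =>
            let r := aLoop distance [] [h] h t
            listed ++ [r.1 ++ [r.2]]) =
      (fun listed g => listed ++ [(match g with
        | [] => ([] : List (List Int))
        | h :: t => (aLoop distance [] [h] h t).1 ++ [(aLoop distance [] [h] h t).2])]) from by
    funext listed g; cases g <;> rfl]
  rw [foldl_append_map]
  simp only [List.nil_append]
  exact List.map_congr_left (fun g _ => group_eq distance g)
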